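-- pv_equiv track=rewrite | github.com/382982408/private_library | evernote/工具打包：_files/extract_vcf.v1.py | mut_revise_from_tail
-- ===== SOURCE A (Python) =====
-- def mut_revise_from_tail(tmp_chr,tmp_start,tmp_end,tmp_ref,tmp_alt,num,tmp_info):
-- 	tmp_start=int(tmp_start);
-- 	tmp_end=int(tmp_end);
-- 	while 1:
-- 		if len(tmp_ref)<1 or len(tmp_alt)<1:
-- 			break;
-- 		elif tmp_ref[-1] == tmp_alt[-1]:
-- 			tmp_ref=tmp_ref[0:-1];
-- 			tmp_alt=tmp_alt[0:-1];
-- 		else: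
-- 			break;
-- 	while 1:
-- 		if len(tmp_ref)<1 or len(tmp_alt)<1:
-- 			break;
-- 		elif tmp_ref[0] == tmp_alt[0]:
-- 			tmp_ref=tmp_ref[1:];
-- 			tmp_alt=tmp_alt[1:];
-- 			tmp_start+=1;
-- 		else:
-- 			break;
-- 	if  len(tmp_ref)==1 and len(tmp_alt)==1:
-- 		tmp_end=tmp_start;
-- 	elif len(tmp_ref)<1 and len(tmp_alt)>=1:
-- 		tmp_start-=1;
-- 		tmp_end=tmp_start+1;
-- 		tmp_ref="-";
-- 	elif len(tmp_ref)>=1 and len(tmp_alt)<1: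
-- 		tmp_end=tmp_start+len(tmp_ref)-1;
-- 		tmp_alt="-";
-- 	else:
-- 		tmp_end=tmp_start+len(tmp_ref)-1;
-- 	return(tmp_chr+"\t"+str(tmp_start)+"\t"+str(tmp_end)+"\t"+tmp_ref+"\t"+tmp_alt+"\t"+str(num)+"\t"+tmp_info);
-- ===== SOURCE B (Python) =====
-- def mut_revise_from_tail(tmp_chr, tmp_start, tmp_end, tmp_ref, tmp_alt, num, tmp_info):
--     start = int(tmp_start)
--     # count common suffix, then common prefix of the remainder; one slice each
--     s = 0
--     for x, y in zip(reversed(tmp_ref), reversed(tmp_alt)):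
--         if x != y:
--             break
--         s += 1
--     ref = tmp_ref[:len(tmp_ref) - s]
--     alt = tmp_alt[:len(tmp_alt) - s]
--     p = 0
--     for x, y in zip(ref, alt):
--         if x != y:
--             break
--         p += 1
--     ref = ref[p:]
--     alt = alt[p:]
--     start += p
--     if len(ref) == 1 and len(alt) == 1:
--         end = start
--     elif not ref and alt:
--         start -= 1
--         end = start + 1
--         ref = "-"
--     elif ref and not alt:
--         end = start + len(ref) - 1
--         alt = "-"
--     else:
--         end = start + len(ref) - 1
--     return f"{tmp_chr}\t{start}\t{end}\t{ref}\t{alt}\t{num}\t{tmp_info}"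
-- ===== Notes on version B (the rewrite author's own statement) =====
-- stated objective: faster
-- what changed: A pops one character per while-loop iteration, building a fresh slice of both alleles each time (quadratic); B counts the common suffix and then common prefix lengths with single zip scans and takes one slice of each allele.
import Mathlib
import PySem

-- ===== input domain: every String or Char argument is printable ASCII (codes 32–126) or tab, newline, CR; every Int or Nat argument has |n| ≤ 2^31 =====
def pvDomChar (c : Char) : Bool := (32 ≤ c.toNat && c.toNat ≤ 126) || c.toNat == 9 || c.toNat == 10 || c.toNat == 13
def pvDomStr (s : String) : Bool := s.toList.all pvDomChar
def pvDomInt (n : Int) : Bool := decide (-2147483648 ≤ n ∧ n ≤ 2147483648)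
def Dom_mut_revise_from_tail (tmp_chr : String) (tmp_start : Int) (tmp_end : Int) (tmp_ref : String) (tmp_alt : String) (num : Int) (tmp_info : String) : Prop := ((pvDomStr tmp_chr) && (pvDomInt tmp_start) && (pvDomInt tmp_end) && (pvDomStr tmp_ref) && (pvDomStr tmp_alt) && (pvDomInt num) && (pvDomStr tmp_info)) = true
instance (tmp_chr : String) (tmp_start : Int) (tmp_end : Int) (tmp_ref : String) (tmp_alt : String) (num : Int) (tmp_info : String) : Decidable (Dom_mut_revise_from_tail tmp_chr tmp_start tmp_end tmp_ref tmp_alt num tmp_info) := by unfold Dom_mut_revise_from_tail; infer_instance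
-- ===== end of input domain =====

-- B replaces A's quadratic pop-one-character-per-iteration trimming loops (a fresh slice per
-- character) by counting the common suffix/prefix lengths and taking a single slice each: O(n).

-- ===== PORT A =====
-- first while loop of A: pop the last char of both while they agree
def pvTrimTailA (r a : List Char) : List Char × List Char :=
  if r.length < 1 ∨ a.length < 1 then (r, a)
  else if PySem.List.pyGetD r (-1) ' ' = PySem.List.pyGetD a (-1) ' ' then
    -- tmp_ref[0:-1], tmp_alt[0:-1]
    pvTrimTailA (PySem.List.slice r (some 0) (some (-1))) (PySem.List.slice a (some 0) (some (-1)))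
  else (r, a)
termination_by r.length
decreasing_by simp [PySem.List.slice_zero_start, PySem.List.slice_to_neg_one, List.length_dropLast]; omega

-- second while loop of A: drop the first char of both while they agree, bumping tmp_start
def pvTrimHeadA (r a : List Char) (st : Int) : List Char × List Char × Int :=
  if r.length < 1 ∨ a.length < 1 then (r, a, st)
  else if PySem.List.pyGetD r 0 ' ' = PySem.List.pyGetD a 0 ' ' then
    -- tmp_ref[1:], tmp_alt[1:], tmp_start += 1
    pvTrimHeadA (PySem.List.slice r (some 1) none) (PySem.List.slice a (some 1) none) (st + 1)
  else (r, a, st)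
termination_by r.length
decreasing_by simp [PySem.List.slice_from_one]; omega

def mut_revise_from_tail (tmp_chr : String) (tmp_start : Int) (tmp_end : Int) (tmp_ref : String) (tmp_alt : String) (num : Int) (tmp_info : String) : String :=
  let s0 : Int := tmp_start      -- int(tmp_start): identity on Int
  let _e0 : Int := tmp_end       -- int(tmp_end): overwritten by every branch below
  let p1 := pvTrimTailA tmp_ref.toList tmp_alt.toList
  let p2 := pvTrimHeadA p1.1 p1.2 s0
  let r := p2.1
  let a := p2.2.1
  let st := p2.2.2
  let q : Int × Int × String × String :=
    if r.length = 1 ∧ a.length = 1 then (st, st, String.ofList r, String.ofList a)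
    else if r.length < 1 ∧ 1 ≤ a.length then (st - 1, st, "-", String.ofList a)
    else if 1 ≤ r.length ∧ a.length < 1 then (st, st + r.length - 1, String.ofList r, "-")
    else (st, st + r.length - 1, String.ofList r, String.ofList a)
  tmp_chr ++ "\t" ++ PySem.Int.toStr q.1 ++ "\t" ++ PySem.Int.toStr q.2.1 ++ "\t" ++ q.2.2.1
    ++ "\t" ++ q.2.2.2 ++ "\t" ++ PySem.Int.toStr num ++ "\t" ++ tmp_info

-- ===== PORT B =====
-- Source B: "for x, y in zip(u, v): if x != y: break; n += 1" — length of the common prefix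
def pvCommonLen : List Char → List Char → Nat
  | x :: xs, y :: ys => if x = y then pvCommonLen xs ys + 1 else 0
  | _, _ => 0

def mut_revise_from_tail_alt (tmp_chr : String) (tmp_start : Int) (tmp_end : Int) (tmp_ref : String) (tmp_alt : String) (num : Int) (tmp_info : String) : String :=
  let start : Int := tmp_start
  let s := pvCommonLen tmp_ref.toList.reverse tmp_alt.toList.reverse
  let ref1 := tmp_ref.toList.take (tmp_ref.toList.length - s)
  let alt1 := tmp_alt.toList.take (tmp_alt.toList.length - s)
  let p := pvCommonLen ref1 alt1
  let ref2 := ref1.drop p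
  let alt2 := alt1.drop p
  let start := start + p
  let q : Int × Int × String × String :=
    if ref2.length = 1 ∧ alt2.length = 1 then (start, start, String.ofList ref2, String.ofList alt2)
    else if ref2 = [] ∧ alt2 ≠ [] then (start - 1, start, "-", String.ofList alt2)
    else if ref2 ≠ [] ∧ alt2 = [] then (start, start + ref2.length - 1, String.ofList ref2, "-")
    else (start, start + ref2.length - 1, String.ofList ref2, String.ofList alt2)
  tmp_chr ++ "\t" ++ PySem.Int.toStr q.1 ++ "\t" ++ PySem.Int.toStr q.2.1 ++ "\t" ++ q.2.2.1
    ++ "\t" ++ q.2.2.2 ++ "\t" ++ PySem.Int.toStr num ++ "\t" ++ tmp_info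

-- ===== PRECONDITION & SPEC =====
def Spec_mut_revise_from_tail (tmp_chr : String) (tmp_start : Int) (tmp_end : Int) (tmp_ref : String) (tmp_alt : String) (num : Int) (tmp_info : String) (out : String) : Prop := out = mut_revise_from_tail_alt tmp_chr tmp_start tmp_end tmp_ref tmp_alt num tmp_info
instance (tmp_chr : String) (tmp_start : Int) (tmp_end : Int) (tmp_ref : String) (tmp_alt : String) (num : Int) (tmp_info : String) (out : String) : Decidable (Spec_mut_revise_from_tail tmp_chr tmp_start tmp_end tmp_ref tmp_alt num tmp_info out) := by unfold Spec_mut_revise_from_tail; infer_instance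

-- ===== CLAIM (what is proved, stated in full; the proofs are below) =====
def Claim_equal_mut_revise_from_tail : Prop := ∀ (tmp_chr : String) (tmp_start : Int) (tmp_end : Int) (tmp_ref : String) (tmp_alt : String) (num : Int) (tmp_info : String), Dom_mut_revise_from_tail tmp_chr tmp_start tmp_end tmp_ref tmp_alt num tmp_info → Spec_mut_revise_from_tail tmp_chr tmp_start tmp_end tmp_ref tmp_alt num tmp_info (mut_revise_from_tail tmp_chr tmp_start tmp_end tmp_ref tmp_alt num tmp_info)

-- ===== LEMMAS AND PROOFS =====

theorem pvCommonLen_comm (r a : List Char) : pvCommonLen r a = pvCommonLen a r := by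
  induction r generalizing a with
  | nil => cases a <;> simp [pvCommonLen]
  | cons x xs ih =>
    cases a with
    | nil => simp [pvCommonLen]
    | cons y ys =>
      simp only [pvCommonLen]
      by_cases h : x = y
      · subst h; simp [ih]
      · rw [if_neg h, if_neg (Ne.symm h)]

theorem pvCommonLen_le_left (r a : List Char) : pvCommonLen r a ≤ r.length := by
  induction r generalizing a with
  | nil => cases a <;> simp [pvCommonLen]
  | cons x xs ih =>
    cases a with
    | nil => simp [pvCommonLen]
    | cons y ys =>
      simp only [pvCommonLen]
      by_cases h : x = y <;> simp [h]
      exact ih ys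

-- A's tail loop trims exactly the common suffix (= common prefix of the reverses)
theorem pvTrimTailA_rev (rr : List Char) : ∀ (ar : List Char),
    pvTrimTailA rr.reverse ar.reverse =
      (rr.reverse.take (rr.length - pvCommonLen rr ar),
       ar.reverse.take (ar.length - pvCommonLen ar rr)) := by
  induction rr with
  | nil => intro ar; rw [pvTrimTailA]; simp [pvCommonLen]
  | cons x xs ih =>
    intro ar
    cases ar with
    | nil => rw [pvTrimTailA]; simp [pvCommonLen]
    | cons y ys =>
      rw [pvTrimTailA]
      simp only [List.reverse_cons]
      by_cases hxy : x = y
      · subst hxy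
        rw [if_neg (by simp), PySem.List.pyGetD_neg_one_append_singleton,
            PySem.List.pyGetD_neg_one_append_singleton, if_pos rfl]
        simp only [PySem.List.slice_zero_start, PySem.List.slice_to_neg_one,
          List.dropLast_concat]
        rw [ih ys]
        have h1 := pvCommonLen_le_left xs ys
        have h2 := pvCommonLen_le_left ys xs
        simp only [pvCommonLen, if_true, List.length_cons, Prod.mk.injEq]
        rw [List.take_append_of_le_length (by rw [List.length_reverse]; omega),
            List.take_append_of_le_length (by rw [List.length_reverse]; omega)]
        exact ⟨by congr 1; omega, by congr 1; omega⟩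
      · rw [if_neg (by simp), PySem.List.pyGetD_neg_one_append_singleton,
            PySem.List.pyGetD_neg_one_append_singleton, if_neg hxy]
        simp only [pvCommonLen]
        rw [if_neg hxy, if_neg (Ne.symm hxy)]
        simp

theorem pvTrimTailA_eq (r a : List Char) :
    pvTrimTailA r a =
      (r.take (r.length - pvCommonLen r.reverse a.reverse),
       a.take (a.length - pvCommonLen a.reverse r.reverse)) := by
  have h := pvTrimTailA_rev r.reverse a.reverse
  simpa using h

-- A's head loop drops exactly the common prefix and adds its length to tmp_start
theorem pvTrimHeadA_eq (r : List Char) : ∀ (a : List Char) (st : Int),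
    pvTrimHeadA r a st
      = (r.drop (pvCommonLen r a), a.drop (pvCommonLen a r), st + pvCommonLen r a) := by
  induction r with
  | nil => intro a st; rw [pvTrimHeadA]; simp [pvCommonLen]
  | cons x xs ih =>
    intro a st
    cases a with
    | nil => rw [pvTrimHeadA]; simp [pvCommonLen]
    | cons y ys =>
      rw [pvTrimHeadA]
      by_cases hxy : x = y
      · subst hxy
        rw [if_neg (by simp), PySem.List.pyGetD_zero_cons, PySem.List.pyGetD_zero_cons,
            if_pos rfl]
        simp only [PySem.List.slice_from_one, List.tail_cons]
        rw [ih ys (st + 1)]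
        simp only [pvCommonLen, if_true, List.drop_succ_cons, Prod.mk.injEq]
        refine ⟨trivial, trivial, ?_⟩
        push_cast
        ring
      · rw [if_neg (by simp), PySem.List.pyGetD_zero_cons, PySem.List.pyGetD_zero_cons,
            if_neg hxy]
        simp only [pvCommonLen]
        rw [if_neg hxy, if_neg (Ne.symm hxy)]
        simp

-- A's length-based branch tests coincide with B's emptiness-based ones
theorem pvBranches_eq (st : Int) (r a : List Char) :
    (if r.length = 1 ∧ a.length = 1 then ((st, st, String.ofList r, String.ofList a) : Int × Int × String × String)
     else if r.length < 1 ∧ 1 ≤ a.length then (st - 1, st, "-", String.ofList a)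
     else if 1 ≤ r.length ∧ a.length < 1 then (st, st + r.length - 1, String.ofList r, "-")
     else (st, st + r.length - 1, String.ofList r, String.ofList a))
  = (if r.length = 1 ∧ a.length = 1 then (st, st, String.ofList r, String.ofList a)
     else if r = [] ∧ a ≠ [] then (st - 1, st, "-", String.ofList a)
     else if r ≠ [] ∧ a = [] then (st, st + r.length - 1, String.ofList r, "-")
     else (st, st + r.length - 1, String.ofList r, String.ofList a)) := by
  split_ifs <;>
    first
      | rfl
      | (exfalso; simp_all [← List.length_eq_zero_iff]; try omega)

-- ===== VERDICT (by name: the statement is the Claim_ definition above) =====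
theorem mut_revise_from_tail_spec : Claim_equal_mut_revise_from_tail := by
  intro tmp_chr tmp_start tmp_end tmp_ref tmp_alt num tmp_info _
  unfold Spec_mut_revise_from_tail mut_revise_from_tail mut_revise_from_tail_alt
  simp only [pvTrimTailA_eq, pvTrimHeadA_eq,
    pvCommonLen_comm tmp_alt.toList.reverse tmp_ref.toList.reverse,
    pvCommonLen_comm
      (tmp_alt.toList.take
        (tmp_alt.toList.length - pvCommonLen tmp_ref.toList.reverse tmp_alt.toList.reverse))
      (tmp_ref.toList.take
        (tmp_ref.toList.length - pvCommonLen tmp_ref.toList.reverse tmp_alt.toList.reverse)),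
    pvBranches_eq]
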